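-- pv_equiv track=rewrite | github.com/rkimoakbioinformatics/oakvar | oakvar/base/vcf2vcf.py | trim_variant
-- ===== SOURCE A (Python) =====
-- def trim_variant(pos, ref, alt):
--     if alt is None:
--         return pos, ref, alt
--     if len(ref) == 1 and len(alt) == 1:
--         return pos, ref, alt
--     ref = list(ref)
--     alt = list(alt)
--     adj = 0
--     while ref and alt and ref[0] == alt[0]:
--         adj += 1
--         ref.pop(0)
--         alt.pop(0)
--     while ref and alt and ref[-1] == alt[-1]:
--         ref.pop()
--         alt.pop()
--     ref = "".join(ref) if ref else "-"
--     alt = "".join(alt) if alt else "-"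
--     return pos + adj, ref, alt
-- ===== SOURCE B (Python) =====
-- def trim_variant(pos, ref, alt):
--     if alt is None:
--         return pos, ref, alt
--     if len(ref) == 1 and len(alt) == 1:
--         return pos, ref, alt
--     r, a = len(ref), len(alt)
--     i = 0
--     while i < r and i < a and ref[i] == alt[i]:
--         i += 1
--     k = 0
--     while k < r - i and k < a - i and ref[r - 1 - k] == alt[a - 1 - k]:
--         k += 1
--     return pos + i, ref[i:r - k] or "-", alt[i:a - k] or "-"
-- ===== Notes on version B (the rewrite author's own statement) =====
-- stated objective: faster
-- what changed: Replaces the quadratic list(ref)/pop(0)/pop() trimming loops with two O(1)-per-step index scans (prefix length i, suffix length k) over the original strings and a single slice per allele.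
import Mathlib
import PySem

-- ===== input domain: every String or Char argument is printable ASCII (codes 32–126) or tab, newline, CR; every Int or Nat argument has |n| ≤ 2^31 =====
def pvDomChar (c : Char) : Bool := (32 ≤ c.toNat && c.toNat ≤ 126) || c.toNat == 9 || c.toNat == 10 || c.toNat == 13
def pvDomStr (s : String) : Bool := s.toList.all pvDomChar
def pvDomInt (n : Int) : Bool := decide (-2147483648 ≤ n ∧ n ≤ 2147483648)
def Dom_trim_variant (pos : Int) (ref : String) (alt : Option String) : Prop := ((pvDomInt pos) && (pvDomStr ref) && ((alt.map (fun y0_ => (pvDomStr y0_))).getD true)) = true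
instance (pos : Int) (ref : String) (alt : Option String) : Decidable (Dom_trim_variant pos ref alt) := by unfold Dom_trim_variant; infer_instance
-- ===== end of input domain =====

-- B replaces A's quadratic pop(0)/pop() trimming by two index scans (prefix length i,
-- suffix length k) plus a single slice per allele; objective: faster (asymptotic).

-- ===== PORT A =====
-- first while loop: pop matching heads, counting adj
def aPrefix : List Char → List Char → Int → (List Char × List Char × Int)
  | [], a, adj => ([], a, adj)
  | r, [], adj => (r, [], adj)
  | c :: cs, d :: ds, adj =>
      if c = d then aPrefix cs ds (adj + 1) else (c :: cs, d :: ds, adj)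

-- second while loop: pop matching last elements (ref[-1] = getLast?, pop() = dropLast)
def aSuffix (r a : List Char) : List Char × List Char :=
 if h : r ≠ [] ∧ a ≠ [] ∧ r.getLast? = a.getLast? then
    aSuffix r.dropLast a.dropLast
  else (r, a)
termination_by r.length
decreasing_by
  have : 0 < r.length := List.length_pos_iff.mpr h.1
  simp [List.length_dropLast]; omega

def trim_variant (pos : Int) (ref : String) (alt : Option String) : Int × String × Option String :=
  match alt with
  | none => (pos, ref, none)
  | some alt =>
    if ref.toList.length = 1 ∧ alt.toList.length = 1 then (pos, ref, some alt)
    else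
      let (r1, a1, adj) := aPrefix ref.toList alt.toList 0
      let (r2, a2) := aSuffix r1 a1
      (pos + adj,
       (if r2 ≠ [] then String.mk r2 else "-"),
       some (if a2 ≠ [] then String.mk a2 else "-"))

-- ===== PORT B =====
-- first while loop of Source B: advance index i over the common prefix
def bPref (R A : List Char) (i : Nat) : Nat :=
  if i < R.length ∧ i < A.length ∧ R[i]? = A[i]? then bPref R A (i + 1) else i
termination_by R.length - i
decreasing_by omega

-- second while loop of Source B: count matching tail characters from the raw ends
def bSuf (R A : List Char) (r a i k : Nat) : Nat :=
  if k < r - i ∧ k < a - i ∧ R[r - 1 - k]? = A[a - 1 - k]? then bSuf R A r a i (k + 1) else k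
termination_by r - i - k
decreasing_by omega

def trim_variant_alt (pos : Int) (ref : String) (alt : Option String) : Int × String × Option String :=
  match alt with
  | none => (pos, ref, none)
  | some alt =>
    let R := ref.toList
    let A := alt.toList
    if R.length = 1 ∧ A.length = 1 then (pos, ref, some alt)
    else
      let r := R.length
      let a := A.length
      let i := bPref R A 0
      let k := bSuf R A r a i 0
      -- ref[i:r-k] / alt[i:a-k] with 0 ≤ i ≤ r-k: slice = drop i, take (r-k-i)
      let rs := (R.drop i).take (r - k - i)
      let as_ := (A.drop i).take (a - k - i)
      (pos + (i : Int),
       (if rs = [] then "-" else String.mk rs),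
       some (if as_ = [] then "-" else String.mk as_))

-- ===== PRECONDITION & SPEC =====
def Spec_trim_variant (pos : Int) (ref : String) (alt : Option String) (out : Int × String × Option String) : Prop := out = trim_variant_alt pos ref alt
instance (pos : Int) (ref : String) (alt : Option String) (out : Int × String × Option String) : Decidable (Spec_trim_variant pos ref alt out) := by unfold Spec_trim_variant; infer_instance

-- ===== CLAIM (what is proved, stated in full; the proofs are below) =====
def Claim_equal_trim_variant : Prop := ∀ (pos : Int) (ref : String) (alt : Option String), Dom_trim_variant pos ref alt → Spec_trim_variant pos ref alt (trim_variant pos ref alt)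

-- ===== LEMMAS AND PROOFS =====

-- common prefix length, the shared characterisation of both first loops
def cpl : List Char → List Char → Nat
  | c :: cs, d :: ds => if c = d then cpl cs ds + 1 else 0
  | _, _ => 0

theorem cpl_nil_left (a : List Char) : cpl [] a = 0 := rfl

theorem cpl_nil_right (r : List Char) : cpl r [] = 0 := by cases r <;> rfl

theorem aPrefix_eq : ∀ (r a : List Char) (adj : Int),
    aPrefix r a adj = (r.drop (cpl r a), a.drop (cpl r a), adj + (cpl r a : Int)) := by
  intro r
  induction r with
  | nil => intro a adj; simp [aPrefix, cpl]
  | cons c cs ih =>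
    intro a adj
    cases a with
    | nil => simp [aPrefix, cpl]
    | cons d ds =>
      by_cases h : c = d
      · subst h
        simp [aPrefix, cpl, ih, Prod.ext_iff]
        omega
      · simp [aPrefix, cpl, h]

theorem bPref_eq (R A : List Char) (i : Nat) :
    bPref R A i = i + cpl (R.drop i) (A.drop i) := by
  rw [bPref]
  split
  · rename_i h
    obtain ⟨h1, h2, h3⟩ := h
    rw [bPref_eq R A (i + 1)]
    rw [List.drop_eq_getElem_cons h1, List.drop_eq_getElem_cons h2]
    have hg : R[i] = A[i] := by
      have := h3
      simp [h1, h2] at this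
      exact this
    simp [cpl, hg]
    omega
  · rename_i h
    rcases Nat.lt_or_ge i R.length with h1 | h1
    · rcases Nat.lt_or_ge i A.length with h2 | h2
      · have h3 : R[i]? ≠ A[i]? := by tauto
        rw [List.drop_eq_getElem_cons h1, List.drop_eq_getElem_cons h2]
        have hg : R[i] ≠ A[i] := by
          intro he
          apply h3
          simp [h1, h2, he]
        simp [cpl, hg]
      · rw [List.drop_eq_nil_of_le h2]
        cases hR : R.drop i <;> simp [cpl]
    · rw [List.drop_eq_nil_of_le h1]; simp [cpl]
termination_by R.length - i
decreasing_by omega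

theorem aSuffix_eq : ∀ (r a : List Char),
    aSuffix r a = ((r.reverse.drop (cpl r.reverse a.reverse)).reverse,
                   (a.reverse.drop (cpl r.reverse a.reverse)).reverse) := by
  intro r a
  rw [aSuffix]
  split
  · rename_i h
    obtain ⟨h1, h2, h3⟩ := h
    obtain ⟨x, rr, hr⟩ : ∃ x rr, r.reverse = x :: rr := by
      cases hr : r.reverse with
      | nil => exact absurd (by simpa using congrArg List.reverse hr) h1
      | cons x rr => exact ⟨x, rr, rfl⟩
    obtain ⟨y, aa, ha⟩ : ∃ y aa, a.reverse = y :: aa := by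
      cases ha : a.reverse with
      | nil => exact absurd (by simpa using congrArg List.reverse ha) h2
      | cons y aa => exact ⟨y, aa, rfl⟩
    have hxy : x = y := by
      rw [List.getLast?_eq_head?_reverse, List.getLast?_eq_head?_reverse, hr, ha] at h3
      simpa using h3
    have hrd : r.dropLast = rr.reverse := by
      have : r = rr.reverse ++ [x] := by
        have := congrArg List.reverse hr; simpa using this
      rw [this, List.dropLast_concat]
    have had : a.dropLast = aa.reverse := by
      have : a = aa.reverse ++ [y] := by
        have := congrArg List.reverse ha; simpa using this
      rw [this, List.dropLast_concat]
    rw [aSuffix_eq r.dropLast a.dropLast, hrd, had, hr, ha]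
    simp [cpl, hxy]
  · rename_i h
    have : cpl r.reverse a.reverse = 0 := by
      cases hr : r.reverse with
      | nil => simp [cpl]
      | cons x rr =>
        cases ha : a.reverse with
        | nil => simp [cpl]
        | cons y aa =>
          have h1 : r ≠ [] := by
            intro he; rw [he] at hr; simp at hr
          have h2 : a ≠ [] := by
            intro he; rw [he] at ha; simp at ha
          have h3 : r.getLast? ≠ a.getLast? := by tauto
          have hxy : x ≠ y := by
            intro he
            apply h3
            rw [List.getLast?_eq_head?_reverse, List.getLast?_eq_head?_reverse, hr, ha]
            simp [he]
          simp [cpl, hxy]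
    simp [this]
termination_by r _ => r.length
decreasing_by
  have : 0 < r.length := List.length_pos_iff.mpr h1
  simp [List.length_dropLast]; omega

theorem bSuf_eq (R A : List Char) (i k : Nat) :
    bSuf R A R.length A.length i k =
      k + cpl (((R.drop i).reverse).drop k) (((A.drop i).reverse).drop k) := by
  rw [bSuf]
  have hlR : (R.drop i).reverse.length = R.length - i := by simp
  have hlA : (A.drop i).reverse.length = A.length - i := by simp
  have hidx : ∀ (L : List Char) (j : Nat), j < L.length - i →
      ((L.drop i).reverse)[j]? = L[L.length - 1 - j]? := by
    intro L j hj
    have hj' : j < (L.drop i).reverse.length := by simp; omega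
    rw [List.getElem?_eq_getElem hj']
    rw [List.getElem?_eq_getElem (by omega : L.length - 1 - j < L.length)]
    congr 1
    rw [List.getElem_reverse, List.getElem_drop]
    congr 1
    simp only [List.length_drop]
    simp only [List.length_reverse, List.length_drop] at hj'
    omega
  split
  · rename_i h
    obtain ⟨h1, h2, h3⟩ := h
    rw [bSuf_eq R A i (k + 1)]
    have hk1 : k < (R.drop i).reverse.length := by omega
    have hk2 : k < (A.drop i).reverse.length := by omega
    rw [List.drop_eq_getElem_cons hk1, List.drop_eq_getElem_cons hk2]
    have hg : ((R.drop i).reverse)[k] = ((A.drop i).reverse)[k] := by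
      have e1 := hidx R k h1
      have e2 := hidx A k h2
      rw [List.getElem?_eq_getElem hk1] at e1
      rw [List.getElem?_eq_getElem hk2] at e2
      have : (some ((R.drop i).reverse)[k] : Option Char) = some ((A.drop i).reverse)[k] := by
        rw [e1, e2, h3]
      simpa using this
    simp [cpl, hg]
    omega
  · rename_i h
    rcases Nat.lt_or_ge k (R.length - i) with h1 | h1
    · rcases Nat.lt_or_ge k (A.length - i) with h2 | h2
      · have h3 : R[R.length - 1 - k]? ≠ A[A.length - 1 - k]? := by tauto
        have hk1 : k < (R.drop i).reverse.length := by omega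
        have hk2 : k < (A.drop i).reverse.length := by omega
        rw [List.drop_eq_getElem_cons hk1, List.drop_eq_getElem_cons hk2]
        have hg : ((R.drop i).reverse)[k] ≠ ((A.drop i).reverse)[k] := by
          intro he
          apply h3
          rw [← hidx R k h1, ← hidx A k h2]
          rw [List.getElem?_eq_getElem hk1, List.getElem?_eq_getElem hk2, he]
        simp only [cpl]
        rw [if_neg hg]
        simp
      · rw [List.drop_eq_nil_of_le (by omega : (A.drop i).reverse.length ≤ k)]
        cases hC : ((R.drop i).reverse).drop k with
        | nil => simp [cpl_nil_left]
        | cons x xs => simp [cpl_nil_right]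
    · rw [List.drop_eq_nil_of_le (by omega : (R.drop i).reverse.length ≤ k)]
      simp [cpl]
termination_by R.length - i - k
decreasing_by omega

theorem cpl_le_left : ∀ (r a : List Char), cpl r a ≤ r.length := by
  intro r
  induction r with
  | nil => intro _; simp [cpl]
  | cons c cs ih =>
    intro a
    cases a with
    | nil => simp [cpl]
    | cons d ds =>
      by_cases h : c = d <;> simp [cpl, h]
      exact ih ds

theorem cpl_le_right : ∀ (r a : List Char), cpl r a ≤ a.length := by
  intro r
  induction r with
  | nil => intro a; simp [cpl]
  | cons c cs ih =>
    intro a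
    cases a with
    | nil => simp [cpl]
    | cons d ds =>
      by_cases h : c = d <;> simp [cpl, h]
      exact ih ds

-- drop from the reverse = reverse of a take
theorem rev_drop_eq_take (L : List Char) (m : Nat) :
    (L.reverse.drop m).reverse = L.take (L.length - m) := by
  rw [List.drop_reverse]
  simp

-- ===== VERDICT (by name: the statement is the Claim_ definition above) =====
theorem trim_variant_spec : Claim_equal_trim_variant := by
  intro pos ref alt _
  unfold Spec_trim_variant
  cases alt with
  | none => rfl
  | some alt =>
    by_cases hc : ref.toList.length = 1 ∧ alt.toList.length = 1
    · simp [trim_variant, trim_variant_alt, hc]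
    · simp only [trim_variant, trim_variant_alt, if_neg hc]
      simp only [aPrefix_eq, aSuffix_eq, bPref_eq, bSuf_eq, List.drop_zero, zero_add]
      set R := ref.toList with hRdef
      set A := alt.toList with hAdef
      set p := cpl R A with hpdef
      set m := cpl (R.drop p).reverse (A.drop p).reverse with hmdef
      have hpr : p ≤ R.length := cpl_le_left R A
      have hpa : p ≤ A.length := cpl_le_right R A
      rw [rev_drop_eq_take (R.drop p) m, rev_drop_eq_take (A.drop p) m]
      simp only [List.length_drop]
      have e1 : R.length - p - m = R.length - m - p := by omega
      have e2 : A.length - p - m = A.length - m - p := by omega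
      rw [e1, e2]
      simp only [Prod.mk.injEq, true_and, ne_eq, List.take_eq_nil_iff, List.drop_eq_nil_iff]
      refine ⟨?_, ?_⟩ <;>
      · split <;>
        first
        | rfl
        | (exfalso; omega)
        | (split <;> first | rfl | (exfalso; omega))
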